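-- pv_equiv track=rewrite | github.com/dafei0755/ai | intelligent_project_analyzer/api/celery_routes.py | _generate_style_anchor
-- ===== SOURCE A (Python) =====
-- from typing import Any, Dict, List
--
-- def _generate_style_anchor(visual_references: List[Dict[str, Any]]) -> str:
--     """从视觉参考中生成全局风格锚点"""
--     if not visual_references:
--         return ""
--
--     all_styles = []
--     all_colors = []
--     all_materials = []
--
--     for ref in visual_references:
--         features = ref.get("structured_features", {})
--         all_styles.extend(features.get("style_keywords", []))
--         all_colors.extend(features.get("dominant_colors", []))
--         all_materials.extend(features.get("materials", []))
--
--     # 去重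
--     def unique_list(items: List[str], max_count: int = 3) -> List[str]:
--         seen = set()
--         result = []
--         for item in items:
--             if item and item not in seen:
--                 seen.add(item)
--                 result.append(item)
--                 if len(result) >= max_count:
--                     break
--         return result
--
--     anchor_parts = unique_list(all_styles, 3) + unique_list(all_colors, 2) + unique_list(all_materials, 2)
--     return ", ".join(anchor_parts) if anchor_parts else ""
-- ===== SOURCE B (Python) =====
-- from typing import Any, Dict, List
--
-- def _generate_style_anchor(visual_references: List[Dict[str, Any]]) -> str:
--     """Streaming one-pass version: per-category capped dedup accumulators."""
--     def take(state, cap, items):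
--         seen, res = state
--         for item in items:
--             if len(res) < cap and item and item not in seen:
--                 seen = seen | {item}
--                 res = res + [item]
--         return (seen, res)
--
--     styles = (set(), [])
--     colors = (set(), [])
--     materials = (set(), [])
--     for ref in visual_references:
--         features = ref.get("structured_features", {})
--         styles = take(styles, 3, features.get("style_keywords", []))
--         colors = take(colors, 2, features.get("dominant_colors", []))
--         materials = take(materials, 2, features.get("materials", []))
--     return ", ".join(styles[1] + colors[1] + materials[1])
-- ===== Notes on version B (the rewrite author's own statement) =====
-- stated objective: alternative
-- what changed: Replaces A's two-phase structure (collect all styles/colors/materials across refs, then dedup each with a capped unique_list) by a single streaming pass that maintains three capped (seen, result) accumulators updated per reference.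
import Mathlib
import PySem

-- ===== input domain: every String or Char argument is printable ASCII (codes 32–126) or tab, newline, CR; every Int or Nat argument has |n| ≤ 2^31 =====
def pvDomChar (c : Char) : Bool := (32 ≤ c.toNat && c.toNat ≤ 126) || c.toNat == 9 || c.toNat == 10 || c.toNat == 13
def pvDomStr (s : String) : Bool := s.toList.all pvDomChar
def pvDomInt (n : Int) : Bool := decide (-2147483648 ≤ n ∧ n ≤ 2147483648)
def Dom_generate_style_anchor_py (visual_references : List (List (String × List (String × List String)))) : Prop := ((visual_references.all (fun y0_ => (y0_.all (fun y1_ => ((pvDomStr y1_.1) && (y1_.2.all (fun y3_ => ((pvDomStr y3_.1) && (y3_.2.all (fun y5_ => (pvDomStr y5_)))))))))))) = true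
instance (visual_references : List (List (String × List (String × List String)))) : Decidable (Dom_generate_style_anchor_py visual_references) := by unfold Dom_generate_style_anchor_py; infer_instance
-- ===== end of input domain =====

-- ===== PORT A =====
-- B replaces A's collect-everything-then-dedup structure by one streaming pass with
-- three capped (seen, result) accumulators (objective: alternative decomposition).

-- A's inner `unique_list` loop: dedup with truthiness filter and early break at max_count.
def uniqLoop : List String → Nat → PySem.Set String → List String → List String
  | [], _, _, result => result
  | item :: rest, maxCount, seen, result =>
    if item ≠ "" ∧ ¬ (PySem.Set.contains seen item) then
      let result' := result ++ [item]
      if maxCount ≤ result'.length then result'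
      else uniqLoop rest maxCount (PySem.Set.add seen item) result'
    else uniqLoop rest maxCount seen result

def unique_list (items : List String) (maxCount : Nat) : List String :=
  uniqLoop items maxCount PySem.Set.empty []

def generate_style_anchor_py (visual_references : List (List (String × List (String × List String)))) : String :=
  if visual_references = [] then ""
  else
    let collected := visual_references.foldl
      (fun (acc : List String × List String × List String) ref =>
        let features := PySem.Dict.getD (PySem.Dict.mk ref) "structured_features" []
        let f := PySem.Dict.mk features
        (acc.1 ++ PySem.Dict.getD f "style_keywords" [],
         acc.2.1 ++ PySem.Dict.getD f "dominant_colors" [],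
         acc.2.2 ++ PySem.Dict.getD f "materials" [])) ([], [], [])
    let anchor_parts := unique_list collected.1 3 ++ unique_list collected.2.1 2
        ++ unique_list collected.2.2 2
    if anchor_parts = [] then "" else PySem.Str.join ", " anchor_parts

-- ===== PORT B =====
-- B's helper `take`: feed items into one capped (seen, result) accumulator.
def take_alt (st : PySem.Set String × List String) (cap : Nat) (items : List String) :
    PySem.Set String × List String :=
  items.foldl
    (fun st item =>
      if st.2.length < cap ∧ item ≠ "" ∧ ¬ (PySem.Set.contains st.1 item) then
        (PySem.Set.add st.1 item, st.2 ++ [item])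
      else st) st

def generate_style_anchor_py_alt (visual_references : List (List (String × List (String × List String)))) : String :=
  let final := visual_references.foldl
    (fun (acc : (PySem.Set String × List String) × (PySem.Set String × List String) ×
        (PySem.Set String × List String)) ref =>
      let features := PySem.Dict.getD (PySem.Dict.mk ref) "structured_features" []
      let f := PySem.Dict.mk features
      (take_alt acc.1 3 (PySem.Dict.getD f "style_keywords" []),
       take_alt acc.2.1 2 (PySem.Dict.getD f "dominant_colors" []),
       take_alt acc.2.2 2 (PySem.Dict.getD f "materials" [])))
    ((PySem.Set.empty, []), (PySem.Set.empty, []), (PySem.Set.empty, []))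
  PySem.Str.join ", " (final.1.2 ++ final.2.1.2 ++ final.2.2.2)

-- ===== PRECONDITION & SPEC =====
def Spec_generate_style_anchor_py (visual_references : List (List (String × List (String × List String)))) (out : String) : Prop := out = generate_style_anchor_py_alt visual_references
instance (visual_references : List (List (String × List (String × List String)))) (out : String) : Decidable (Spec_generate_style_anchor_py visual_references out) := by unfold Spec_generate_style_anchor_py; infer_instance

-- ===== CLAIM (what is proved, stated in full; the proofs are below) =====
def Claim_equal_generate_style_anchor_py : Prop := ∀ (visual_references : List (List (String × List (String × List String)))), Dom_generate_style_anchor_py visual_references → Spec_generate_style_anchor_py visual_references (generate_style_anchor_py visual_references)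

-- ===== LEMMAS AND PROOFS =====

-- the three per-ref item lists
def itemsOf (key : String) (ref : List (String × List (String × List String))) : List String :=
  PySem.Dict.getD (PySem.Dict.mk (PySem.Dict.getD (PySem.Dict.mk ref) "structured_features" [])) key []

-- once a category is full, further items are no-ops
theorem take_alt_full (st : PySem.Set String × List String) (cap : Nat)
    (items : List String) (h : cap ≤ st.2.length) : take_alt st cap items = st := by
  induction items with
  | nil => rfl
  | cons x xs ih =>
    simp only [take_alt, List.foldl_cons] at *
    rw [if_neg (by omega), ih]

-- A's break-at-cap loop computes B's streaming accumulator, as long as the cap is not yet reached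
theorem uniqLoop_eq_take_alt (cap : Nat) :
    ∀ (items : List String) (seen : PySem.Set String) (res : List String),
      res.length < cap →
      uniqLoop items cap seen res = (take_alt (seen, res) cap items).2 := by
  intro items
  induction items with
  | nil => intro seen res _; rfl
  | cons x xs ih =>
    intro seen res hlt
    by_cases hc : x ≠ "" ∧ ¬ (PySem.Set.contains seen x)
    · simp only [uniqLoop, take_alt, List.foldl_cons, if_pos hc]
      rw [if_pos (⟨hlt, hc⟩ : res.length < cap ∧ x ≠ "" ∧ ¬ (PySem.Set.contains seen x))]
      by_cases hcap : cap ≤ (res ++ [x]).length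
      · rw [if_pos hcap]
        have h2 := take_alt_full (PySem.Set.add seen x, res ++ [x]) cap xs (by simpa using hcap)
        simp only [take_alt] at h2
        rw [h2]
      · rw [if_neg hcap]
        exact ih (PySem.Set.add seen x) (res ++ [x]) (by omega)
    · simp only [uniqLoop, take_alt, List.foldl_cons, if_neg hc]
      rw [if_neg (show ¬ (res.length < cap ∧ x ≠ "" ∧ ¬ (PySem.Set.contains seen x)) by tauto)]
      exact ih seen res hlt

-- the componentwise shape of B's triple fold
theorem foldl_triple (refs : List (List (String × List (String × List String))))
    (a b c : PySem.Set String × List String) :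
    refs.foldl
      (fun (acc : (PySem.Set String × List String) × (PySem.Set String × List String) ×
          (PySem.Set String × List String)) ref =>
        let features := PySem.Dict.getD (PySem.Dict.mk ref) "structured_features" []
        let f := PySem.Dict.mk features
        (take_alt acc.1 3 (PySem.Dict.getD f "style_keywords" []),
         take_alt acc.2.1 2 (PySem.Dict.getD f "dominant_colors" []),
         take_alt acc.2.2 2 (PySem.Dict.getD f "materials" []))) (a, b, c)
    = (refs.foldl (fun st ref => take_alt st 3 (itemsOf "style_keywords" ref)) a,
       refs.foldl (fun st ref => take_alt st 2 (itemsOf "dominant_colors" ref)) b,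
       refs.foldl (fun st ref => take_alt st 2 (itemsOf "materials" ref)) c) := by
  induction refs generalizing a b c with
  | nil => rfl
  | cons r rs ih => simp only [List.foldl_cons, itemsOf]; exact ih _ _ _

-- the componentwise shape of A's triple collecting fold
theorem foldl_collect (refs : List (List (String × List (String × List String))))
    (a b c : List String) :
    refs.foldl
      (fun (acc : List String × List String × List String) ref =>
        let features := PySem.Dict.getD (PySem.Dict.mk ref) "structured_features" []
        let f := PySem.Dict.mk features
        (acc.1 ++ PySem.Dict.getD f "style_keywords" [],
         acc.2.1 ++ PySem.Dict.getD f "dominant_colors" [],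
         acc.2.2 ++ PySem.Dict.getD f "materials" [])) (a, b, c)
    = (a ++ refs.flatMap (itemsOf "style_keywords"),
       b ++ refs.flatMap (itemsOf "dominant_colors"),
       c ++ refs.flatMap (itemsOf "materials")) := by
  induction refs generalizing a b c with
  | nil => simp
  | cons r rs ih =>
    simp only [List.foldl_cons, List.flatMap_cons, itemsOf]
    rw [ih]
    simp [List.append_assoc]

-- folding take_alt ref by ref is take_alt on the flattened item stream
theorem foldl_take_alt_flatMap (key : String)
    (refs : List (List (String × List (String × List String))))
    (cap : Nat) (st : PySem.Set String × List String) :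
    refs.foldl (fun st ref => take_alt st cap (itemsOf key ref)) st
      = take_alt st cap (refs.flatMap (itemsOf key)) := by
  induction refs generalizing st with
  | nil => rfl
  | cons r rs ih =>
    simp only [List.foldl_cons, List.flatMap_cons]
    rw [ih]
    simp only [take_alt, List.foldl_append]

-- per category: A's unique_list over the flattened stream = B's streamed result
theorem unique_eq_streamed (key : String) (cap : Nat) (hcap : 0 < cap)
    (refs : List (List (String × List (String × List String)))) :
    unique_list (refs.flatMap (itemsOf key)) cap
      = (refs.foldl (fun st ref => take_alt st cap (itemsOf key ref))
          (PySem.Set.empty, [])).2 := by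
  rw [foldl_take_alt_flatMap, unique_list]
  exact uniqLoop_eq_take_alt cap _ PySem.Set.empty [] (by simpa using hcap)

theorem join_empty_parts : PySem.Str.join ", " ([] : List String) = "" := by decide

-- ===== VERDICT (by name: the statement is the Claim_ definition above) =====
theorem generate_style_anchor_py_spec : Claim_equal_generate_style_anchor_py := by
  intro vrs _
  unfold Spec_generate_style_anchor_py generate_style_anchor_py generate_style_anchor_py_alt
  rw [foldl_triple, foldl_collect]
  simp only [List.nil_append]
  by_cases hnil : vrs = []
  · subst hnil; simp [take_alt, join_empty_parts]
  · rw [if_neg hnil]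
    rw [unique_eq_streamed "style_keywords" 3 (by omega),
        unique_eq_streamed "dominant_colors" 2 (by omega),
        unique_eq_streamed "materials" 2 (by omega)]
    split_ifs with h
    · rw [h, join_empty_parts]
    · rfl
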